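-- pv_equiv track=rewrite | github.com/Astrocyte74/tts-hub | backend/app.py | _extract_chattts_speaker
-- ===== SOURCE A (Python) =====
-- from typing import Any, Callable, Dict, Iterable, List, Optional, Set, Tuple
--
-- def _extract_chattts_speaker(stdout: str) -> Optional[str]:
--     capture_next = False
--     for raw_line in stdout.splitlines():
--         if capture_next:
--             candidate = raw_line.strip()
--             if candidate:
--                 return candidate
--             continue
--         if "Use speaker" in raw_line:
--             capture_next = True
--     return None
-- ===== SOURCE B (Python) =====
-- def _extract_chattts_speaker(stdout):
--     first_nonblank = None  # first non-empty stripped line of the suffix processed so far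
--     answer = None
--     for line in reversed(stdout.splitlines()):
--         if "Use speaker" in line:
--             answer = first_nonblank
--         stripped = line.strip()
--         if stripped:
--             first_nonblank = stripped
--     return answer
-- ===== Notes on version B (the rewrite author's own statement) =====
-- stated objective: alternative
-- what changed: Replaced the forward flag-driven scan with an early return by a single back-to-front fold over the lines that maintains a pair of accumulators (first non-blank stripped line of the suffix seen so far, and the answer), with no early exit; the answer recorded at the earliest marker line wins.
import Mathlib
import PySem

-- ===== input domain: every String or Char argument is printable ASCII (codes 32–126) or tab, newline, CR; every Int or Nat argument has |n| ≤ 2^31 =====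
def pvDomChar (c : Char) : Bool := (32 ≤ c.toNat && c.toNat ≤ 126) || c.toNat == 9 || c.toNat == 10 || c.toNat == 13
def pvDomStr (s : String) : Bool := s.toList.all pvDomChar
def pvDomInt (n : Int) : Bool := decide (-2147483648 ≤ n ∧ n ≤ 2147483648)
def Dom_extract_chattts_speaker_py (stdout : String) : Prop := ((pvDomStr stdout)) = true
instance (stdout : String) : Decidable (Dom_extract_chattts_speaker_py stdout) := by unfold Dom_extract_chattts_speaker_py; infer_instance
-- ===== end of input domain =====

-- B replaces A's forward flag-driven scan (with early return) by one back-to-front fold over the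
-- lines carrying a pair accumulator (first non-blank stripped line of the suffix, answer); same cost.

-- ===== PORT A =====
-- A's single loop with the capture_next flag, as structural recursion over the lines.
def extractLoopA : Bool → List String → Option String
  | _, [] => none
  | captureNext, rawLine :: rest =>
    if captureNext then
      let candidate := PySem.Str.strip rawLine
      if candidate ≠ "" then some candidate
      else extractLoopA captureNext rest
    else if PySem.Str.isIn "Use speaker" rawLine then extractLoopA true rest
    else extractLoopA captureNext rest

def extract_chattts_speaker_py (stdout : String) : Option String :=
  extractLoopA false (PySem.Str.splitlines stdout)

-- ===== PORT B =====
-- B's loop body: given (first_nonblank, answer) for the already-processed suffix, fold in one line.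
def stepB (st : Option String × Option String) (line : String) : Option String × Option String :=
  let answer := if PySem.Str.isIn "Use speaker" line then st.1 else st.2
  let stripped := PySem.Str.strip line
  let firstNonblank := if stripped ≠ "" then some stripped else st.1
  (firstNonblank, answer)

def extract_chattts_speaker_py_alt (stdout : String) : Option String :=
  (((PySem.Str.splitlines stdout).reverse).foldl stepB (none, none)).2

-- ===== PRECONDITION & SPEC =====
def Spec_extract_chattts_speaker_py (stdout : String) (out : Option String) : Prop := out = extract_chattts_speaker_py_alt stdout
instance (stdout : String) (out : Option String) : Decidable (Spec_extract_chattts_speaker_py stdout out) := by unfold Spec_extract_chattts_speaker_py; infer_instance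

-- ===== CLAIM (what is proved, stated in full; the proofs are below) =====
def Claim_equal_extract_chattts_speaker_py : Prop := ∀ (stdout : String), Dom_extract_chattts_speaker_py stdout → Spec_extract_chattts_speaker_py stdout (extract_chattts_speaker_py stdout)

-- ===== LEMMAS AND PROOFS =====
-- First non-empty stripped line of a list (A's loop once the flag is set computes exactly this).
def firstStripped : List String → Option String
  | [] => none
  | line :: rest =>
    let candidate := PySem.Str.strip line
    if candidate ≠ "" then some candidate else firstStripped rest

theorem extractLoopA_true (ls : List String) : extractLoopA true ls = firstStripped ls := by
  induction ls with
  | nil => rfl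
  | cons l rest ih => simp [extractLoopA, firstStripped, ih]

-- The invariant of B's backward fold: over the reversed suffix it computes
-- (first non-blank stripped line of the suffix, A's result on the suffix with the flag unset).
theorem foldB_invariant (ls : List String) :
    (ls.reverse.foldl stepB (none, none)) = (firstStripped ls, extractLoopA false ls) := by
  induction ls with
  | nil => rfl
  | cons l rest ih =>
    have : (l :: rest).reverse = rest.reverse ++ [l] := by simp
    rw [this, List.foldl_append, ih]
    simp only [List.foldl, stepB, firstStripped, extractLoopA]
    simp [extractLoopA_true]

-- ===== VERDICT (by name: the statement is the Claim_ definition above) =====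
theorem extract_chattts_speaker_py_spec : Claim_equal_extract_chattts_speaker_py := by
  intro stdout _
  unfold Spec_extract_chattts_speaker_py extract_chattts_speaker_py extract_chattts_speaker_py_alt
  rw [foldB_invariant]
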